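-- pv_equiv track=rewrite | github.com/johnserra/bd-automation-suite | modules/lead_scoring/scorer.py | format_score_distribution
-- ===== SOURCE A (Python) =====
-- def format_score_distribution(scores: list[int]) -> str:
--     """Format a score histogram in 20-point bands."""
--     bands = [(80, 100), (60, 79), (40, 59), (20, 39), (0, 19)]
--     lines = ["SCORE DISTRIBUTION"]
--     lines.append("─" * 30)
--     for lo, hi in bands:
--         count = sum(1 for s in scores if lo <= s <= hi)
--         bar = "█" * min(count, 30)
--         lines.append(f"  {lo:>3}–{hi}: {count:>3}  {bar}")
--     return "\n".join(lines)
-- ===== SOURCE B (Python) =====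
-- def format_score_distribution(scores: list[int]) -> str:
--     """Format a score histogram in 20-point bands."""
--     bands = [(80, 100), (60, 79), (40, 59), (20, 39), (0, 19)]
--     counts = [0] * 5
--     for s in scores:
--         if 0 <= s <= 100:
--             counts[4 - min(s // 20, 4)] += 1
--     lines = ["SCORE DISTRIBUTION", "─" * 30]
--     for (lo, hi), count in zip(bands, counts):
--         bar = "█" * min(count, 30)
--         lines.append(f"  {lo:>3}–{hi}: {count:>3}  {bar}")
--     return "\n".join(lines)
-- ===== Notes on version B (the rewrite author's own statement) =====
-- stated objective: simpler
-- what changed: Replaces A's five separate scans of the scores list (one per band) with a single bucketing pass that computes a 5-entry counts table via the band index 4 - min(s // 20, 4), then emits the identical lines from the fixed bands zipped with the counts.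
import Mathlib
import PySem

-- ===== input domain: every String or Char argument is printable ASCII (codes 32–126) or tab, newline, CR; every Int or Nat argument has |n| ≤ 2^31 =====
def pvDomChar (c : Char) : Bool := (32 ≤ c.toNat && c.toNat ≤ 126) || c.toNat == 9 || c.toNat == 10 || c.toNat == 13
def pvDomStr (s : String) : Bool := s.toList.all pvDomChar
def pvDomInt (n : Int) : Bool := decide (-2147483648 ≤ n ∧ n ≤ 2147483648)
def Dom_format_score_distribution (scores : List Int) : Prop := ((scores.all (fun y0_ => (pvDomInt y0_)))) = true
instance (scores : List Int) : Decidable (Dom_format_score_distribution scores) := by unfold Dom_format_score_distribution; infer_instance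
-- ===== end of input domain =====

-- B replaces A's five per-band scans of `scores` with one bucketing pass into a counts table (simpler single pass).

-- shared formatting helper: the f-string "  {lo:>3}–{hi}: {count:>3}  {bar}" (both Pythons build identical lines);
-- `{x:>3}` is a right-justify to width 3, ported by hand (exact: pad with spaces on the left up to length 3)
def pvRjust3 (cs : List Char) : List Char := List.replicate (3 - cs.length) ' ' ++ cs

def pvLine (lo hi cnt : Int) : List Char :=
  [' ', ' '] ++ pvRjust3 (PySem.Int.toChars lo) ++ ['–'] ++ PySem.Int.toChars hi
    ++ [':', ' '] ++ pvRjust3 (PySem.Int.toChars cnt) ++ [' ', ' ']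
    ++ List.replicate (min cnt 30).toNat '█'   -- "█" * min(count, 30); count ≥ 0 so toNat is exact

-- ===== PORT A =====
-- sum(1 for s in scores if lo <= s <= hi)
def pvCountBand (scores : List Int) (lo hi : Int) : Int :=
  scores.foldl (fun acc s => if lo ≤ s ∧ s ≤ hi then acc + 1 else acc) 0

def format_score_distribution (scores : List Int) : String :=
  let bands : List (Int × Int) := [(80, 100), (60, 79), (40, 59), (20, 39), (0, 19)]
  let lines : List (List Char) := ["SCORE DISTRIBUTION".toList, List.replicate 30 '─']
  let lines := bands.foldl (fun ls p => ls ++ [pvLine p.1 p.2 (pvCountBand scores p.1 p.2)]) lines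
  String.ofList (List.intercalate ['\n'] lines)   -- "\n".join(lines), ported by hand (exact)

-- ===== PORT B =====
-- if 0 <= s <= 100: counts[4 - min(s // 20, 4)] += 1   (index provably in 0..4, so toNat is exact)
def pvBump (cs : List Int) (s : Int) : List Int :=
  if 0 ≤ s ∧ s ≤ 100 then
    let idx := (4 - min (PySem.Int.floordiv s 20) 4).toNat
    cs.set idx (cs.getD idx 0 + 1)
  else cs

def format_score_distribution_alt (scores : List Int) : String :=
  let counts := scores.foldl pvBump [0, 0, 0, 0, 0]
  let bands : List (Int × Int) := [(80, 100), (60, 79), (40, 59), (20, 39), (0, 19)]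
  let body := (bands.zip counts).map (fun bc => pvLine bc.1.1 bc.1.2 bc.2)
  String.ofList (List.intercalate ['\n']
    ("SCORE DISTRIBUTION".toList :: List.replicate 30 '─' :: body))

-- ===== PRECONDITION & SPEC =====
def Spec_format_score_distribution (scores : List Int) (out : String) : Prop := out = format_score_distribution_alt scores
instance (scores : List Int) (out : String) : Decidable (Spec_format_score_distribution scores out) := by unfold Spec_format_score_distribution; infer_instance

-- ===== CLAIM (what is proved, stated in full; the proofs are below) =====
def Claim_equal_format_score_distribution : Prop := ∀ (scores : List Int), Dom_format_score_distribution scores → Spec_format_score_distribution scores (format_score_distribution scores)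

-- ===== LEMMAS AND PROOFS =====

-- spec-side band count, recursive form
def pvN (lo hi : Int) : List Int → Int
  | [] => 0
  | s :: r => (if lo ≤ s ∧ s ≤ hi then 1 else 0) + pvN lo hi r

lemma pvCountBand_foldl (lo hi : Int) (scores : List Int) (acc : Int) :
    scores.foldl (fun acc s => if lo ≤ s ∧ s ≤ hi then acc + 1 else acc) acc
      = acc + pvN lo hi scores := by
  induction scores generalizing acc with
  | nil => simp [pvN]
  | cons s r ih =>
    simp only [List.foldl_cons, pvN, ih]
    split_ifs <;> ring

lemma pvFoldl_bump (scores : List Int) (a b c d e : Int) :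
    scores.foldl pvBump [a, b, c, d, e]
      = [a + pvN 80 100 scores, b + pvN 60 79 scores, c + pvN 40 59 scores,
         d + pvN 20 39 scores, e + pvN 0 19 scores] := by
  induction scores generalizing a b c d e with
  | nil => simp [pvN]
  | cons s r ih =>
    simp only [List.foldl_cons]
    by_cases h : 0 ≤ s ∧ s ≤ 100
    · rw [show pvBump [a, b, c, d, e] s
          = if 80 ≤ s then [a + 1, b, c, d, e]
            else if 60 ≤ s then [a, b + 1, c, d, e]
            else if 40 ≤ s then [a, b, c + 1, d, e]
            else if 20 ≤ s then [a, b, c, d + 1, e]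
            else [a, b, c, d, e + 1] from by
        have hfd : PySem.Int.floordiv s 20 = s / 20 :=
          PySem.Int.floordiv_eq_ediv_of_pos (by norm_num)
        simp only [pvBump, if_pos h, hfd]
        split_ifs with h1 h2 h3 h4 <;>
          · have : (4 - min (s / 20) 4).toNat
                = (if 80 ≤ s then 0 else if 60 ≤ s then 1 else if 40 ≤ s then 2
                   else if 20 ≤ s then 3 else 4) := by
              obtain ⟨hs0, hs1⟩ := h; split_ifs <;> omega
            simp [this, *, List.set, List.getD]]
      split_ifs with h1 h2 h3 h4 <;>
        · rw [ih]; simp only [pvN]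
          refine congrArg₂ _ ?_ (congrArg₂ _ ?_ (congrArg₂ _ ?_ (congrArg₂ _ ?_
            (congrArg₂ _ ?_ rfl)))) <;> split_ifs <;> omega
    · rw [show pvBump [a, b, c, d, e] s = [a, b, c, d, e] from by
        simp [pvBump, h]]
      rw [ih]; simp only [pvN]
      refine congrArg₂ _ ?_ (congrArg₂ _ ?_ (congrArg₂ _ ?_ (congrArg₂ _ ?_
        (congrArg₂ _ ?_ rfl)))) <;> split_ifs <;> omega

-- ===== VERDICT (by name: the statement is the Claim_ definition above) =====
theorem format_score_distribution_spec : Claim_equal_format_score_distribution := by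
  intro scores _
  unfold Spec_format_score_distribution format_score_distribution format_score_distribution_alt
  simp only [pvFoldl_bump, pvCountBand, pvCountBand_foldl, List.foldl_cons, List.foldl_nil,
    List.zip, List.zipWith, List.map, zero_add]
  rfl
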